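-- pv_equiv track=rewrite | github.com/withNoclout/LeetCode-Med | quiz_centeredSubarray.py | centeredSubarrays
-- ===== SOURCE A (Python) =====
-- def centeredSubarrays(nums):
--     """
--     :type nums: List[int]
--     :rtype: int
--     """
--     n = len(nums)
--     count = 0
--
--     # Iterate over every possible starting index of a subarray
--     for i in range(n):
--         current_sum = 0
--         seen = set()
--
--         # Iterate over every possible ending index, expanding the subarray
--         for j in range(i, n):
--             val = nums[j]
--             current_sum += val
--             seen.add(val)
--
--             # Check condition: Sum of elements equals at least one element in the subarray
--             if current_sum in seen:
--                 count += 1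
--
--     return count
-- ===== SOURCE B (Python) =====
-- def centeredSubarrays(nums):
--     """
--     :type nums: List[int]
--     :rtype: int
--     """
--     n = len(nums)
--     count = 0
--     for i in range(n):
--         for j in range(i, n):
--             sub = nums[i:j+1]
--             if sum(sub) in sub:
--                 count += 1
--     return count
-- ===== Notes on version B (the rewrite author's own statement) =====
-- stated objective: simpler
-- what changed: Drops A's maintained inner-loop state (running current_sum and a growing seen set); each (i,j) pair is judged statelessly by recomputing the slice nums[i:j+1] and testing sum(sub) in sub directly.
import Mathlib
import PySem

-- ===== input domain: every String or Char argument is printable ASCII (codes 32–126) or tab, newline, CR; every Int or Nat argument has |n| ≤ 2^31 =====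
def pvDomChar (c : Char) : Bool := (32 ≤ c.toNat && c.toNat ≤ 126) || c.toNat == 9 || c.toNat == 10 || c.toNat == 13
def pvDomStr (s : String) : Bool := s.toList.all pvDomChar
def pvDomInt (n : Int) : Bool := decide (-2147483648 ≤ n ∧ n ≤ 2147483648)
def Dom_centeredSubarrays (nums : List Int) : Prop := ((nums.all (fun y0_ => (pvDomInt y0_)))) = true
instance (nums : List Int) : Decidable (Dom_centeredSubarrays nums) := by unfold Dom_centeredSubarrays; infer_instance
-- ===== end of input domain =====

-- B drops A's maintained inner-loop state (running sum + seen set) in favour of stateless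
-- per-(i,j) recomputation from the slice; equivalence of the two is proved below.

-- ===== PORT A =====
-- A maintains, for each start index i, a running current_sum and a seen set across the inner loop.
def centeredSubarrays (nums : List Int) : Int :=
  let n : Int := nums.length
  (PySem.List.pyRange 0 n 1).foldl
    (fun count i =>
      ((PySem.List.pyRange i n 1).foldl
        (fun (st : Int × PySem.Set Int × Int) j =>
          let val := PySem.List.pyGetD nums j 0   -- nums[j]; j is always in range here
          let currentSum := st.1 + val
          let seen := PySem.Set.add st.2.1 val
          (currentSum, seen,
            if PySem.Set.contains seen currentSum then st.2.2 + 1 else st.2.2))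
        (0, PySem.Set.empty, count)).2.2)
    0

-- ===== PORT B =====
-- B keeps no state across the inner loop: each (i, j) is judged from the slice nums[i:j+1] alone.
def centeredSubarrays_alt (nums : List Int) : Int :=
  let n : Int := nums.length
  (PySem.List.pyRange 0 n 1).foldl
    (fun count i =>
      (PySem.List.pyRange i n 1).foldl
        (fun count j =>
          let sub := PySem.List.slice nums (some i) (some (j + 1))
          if sub.sum ∈ sub then count + 1 else count)
        count)
    0

-- ===== PRECONDITION & SPEC =====
def Spec_centeredSubarrays (nums : List Int) (out : Int) : Prop := out = centeredSubarrays_alt nums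
instance (nums : List Int) (out : Int) : Decidable (Spec_centeredSubarrays nums out) := by unfold Spec_centeredSubarrays; infer_instance

-- ===== CLAIM (what is proved, stated in full; the proofs are below) =====
def Claim_equal_centeredSubarrays : Prop := ∀ (nums : List Int), Dom_centeredSubarrays nums → Spec_centeredSubarrays nums (centeredSubarrays nums)

-- ===== LEMMAS AND PROOFS =====

-- the slice grows by exactly nums[b] when the inner loop advances from j = b to j = b+1
lemma take_snoc (nums : List Int) (a b : Nat) (hab : a ≤ b) (hb : b < nums.length) :
    (nums.drop a).take (b + 1 - a) = (nums.drop a).take (b - a) ++ [nums[b]] := by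
  have h2 : b + 1 - a = (b - a) + 1 := by omega
  rw [h2, List.take_add_one]
  have h3 : (nums.drop a)[b - a]? = some nums[b] := by
    rw [List.getElem?_drop]
    have h4 : a + (b - a) = b := by omega
    rw [h4, List.getElem?_eq_getElem hb]
  simp [h3]

lemma slice_snoc (nums : List Int) (a b : Nat) (hab : a ≤ b) (hb : b < nums.length) :
    PySem.List.slice nums (some (a : Int)) (some ((b : Int) + 1))
      = PySem.List.slice nums (some (a : Int)) (some (b : Int)) ++ [nums[b]] := by
  have h1 : ((b : Int) + 1) = ((b + 1 : Nat) : Int) := by push_cast; ring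
  rw [h1, PySem.List.slice_natCast, PySem.List.slice_natCast, take_snoc nums a b hab hb]

-- inner-loop invariant: A's running state over the suffix of indices [b, n) equals B's
-- stateless recomputation, provided A's state describes the slice nums[a:b]
lemma inner_eq (nums : List Int) (a : Nat) (_ha : a ≤ nums.length) :
    ∀ (m b : Nat), a ≤ b → b ≤ nums.length → nums.length - b = m →
    ∀ (c : Int) (seen : PySem.Set Int),
      (∀ x : Int, x ∈ seen ↔ x ∈ (nums.drop a).take (b - a)) →
      ((PySem.List.pyRange (b : Int) (nums.length : Int) 1).foldl
        (fun (st : Int × PySem.Set Int × Int) j =>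
          let val := PySem.List.pyGetD nums j 0
          let currentSum := st.1 + val
          let seen := PySem.Set.add st.2.1 val
          (currentSum, seen,
            if PySem.Set.contains seen currentSum then st.2.2 + 1 else st.2.2))
        (((nums.drop a).take (b - a)).sum, seen, c)).2.2
      = (PySem.List.pyRange (b : Int) (nums.length : Int) 1).foldl
          (fun count j =>
            let sub := PySem.List.slice nums (some (a : Int)) (some (j + 1))
            if sub.sum ∈ sub then count + 1 else count)
          c := by
  intro m
  induction m with
  | zero =>
    intro b hab hbn hm c seen hseen
    have hb : b = nums.length := by omega
    subst hb
    rw [PySem.List.pyRange_one_eq_nil (le_refl _)]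
    rfl
  | succ m ih =>
    intro b hab hbn hm c seen hseen
    have hb : b < nums.length := by omega
    have hcons : PySem.List.pyRange (b : Int) (nums.length : Int) 1
        = (b : Int) :: PySem.List.pyRange ((b : Int) + 1) (nums.length : Int) 1 :=
      PySem.List.pyRange_one_cons (by exact_mod_cast hb)
    have hnext : ((b : Int) + 1) = ((b + 1 : Nat) : Int) := by push_cast; ring
    have hval : PySem.List.pyGetD nums (b : Int) 0 = nums[b] := by
      rw [PySem.List.pyGetD_natCast]
      exact List.getD_eq_getElem _ _ hb
    have hsnoc := take_snoc nums a b hab hb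
    -- the two step conditions agree
    have hcond : (PySem.Set.contains (PySem.Set.add seen nums[b])
          (((nums.drop a).take (b - a)).sum + nums[b]) = true)
        ↔ (PySem.List.slice nums (some (a : Int)) (some ((b : Int) + 1))).sum
            ∈ PySem.List.slice nums (some (a : Int)) (some ((b : Int) + 1)) := by
      rw [slice_snoc nums a b hab hb, PySem.List.slice_natCast, PySem.Set.contains_iff, PySem.Set.mem_add]
      constructor
      · rintro (hx | hx)
        · rw [List.sum_append]; simp only [List.sum_cons, List.sum_nil, add_zero]
          exact List.mem_append_left _ ((hseen _).mp hx)
        · rw [List.sum_append]; simp only [List.sum_cons, List.sum_nil, add_zero]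
          rw [hx]; exact List.mem_append_right _ (by simp)
      · intro hx
        rw [List.sum_append] at hx
        simp only [List.sum_cons, List.sum_nil, add_zero] at hx
        rcases List.mem_append.mp hx with hx | hx
        · exact Or.inl ((hseen _).mpr hx)
        · exact Or.inr (by simpa using hx)
    rw [hcons]
    simp only [List.foldl_cons, hval]
    have hseen' : ∀ x : Int, x ∈ PySem.Set.add seen nums[b]
        ↔ x ∈ (nums.drop a).take (b + 1 - a) := by
      intro x
      rw [PySem.Set.mem_add, hsnoc, List.mem_append]
      constructor
      · rintro (hx | hx)
        · exact Or.inl ((hseen _).mp hx)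
        · exact Or.inr (by simp [hx])
      · rintro (hx | hx)
        · exact Or.inl ((hseen _).mpr hx)
        · exact Or.inr (by simpa using hx)
    have hsum' : ((nums.drop a).take (b - a)).sum + nums[b]
        = ((nums.drop a).take (b + 1 - a)).sum := by
      rw [hsnoc, List.sum_append]; simp
    by_cases hc : (PySem.List.slice nums (some (a : Int)) (some ((b : Int) + 1))).sum
        ∈ PySem.List.slice nums (some (a : Int)) (some ((b : Int) + 1))
    · rw [if_pos (hcond.mpr hc), if_pos hc, hsum', hnext]
      exact ih (b + 1) (by omega) (by omega) (by omega) (c + 1) _ hseen'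
    · rw [if_neg (fun h => hc (hcond.mp h)), if_neg hc, hsum', hnext]
      exact ih (b + 1) (by omega) (by omega) (by omega) c _ hseen'

-- ===== VERDICT (by name: the statement is the Claim_ definition above) =====
theorem centeredSubarrays_spec : Claim_equal_centeredSubarrays := by
  intro nums _
  unfold Spec_centeredSubarrays centeredSubarrays centeredSubarrays_alt
  simp only []
  apply PySem.List.foldl_congr_mem
  intro count i hi
  rcases (PySem.List.mem_pyRange_one).mp hi with ⟨h0, hn⟩
  have ha : i = ((i.toNat : Nat) : Int) := by omega
  have han : i.toNat ≤ nums.length := by omega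
  rw [ha]
  have := inner_eq nums i.toNat han (nums.length - i.toNat) i.toNat (le_refl _) han rfl
      count PySem.Set.empty (by intro x; simp [PySem.Set.empty])
  simpa [Nat.sub_self] using this
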